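-- pv_equiv track=rewrite | github.com/klentak/zadanie8.4 | rsa.py | divide_into_blocks
-- ===== SOURCE A (Python) =====
-- def divide_into_blocks(message: str, blockSize: int):
--   i = 0
--   result = []
--   while i < len(message):
--     tempResult = 0
--     for j in range(blockSize):
--       if i >= len(message):
--         break
--       tempResult += ord(message[i]) * (8 ** j)
--       i += 1
--     result.append(tempResult)
--
--   return result
-- ===== SOURCE B (Python) =====
-- def encode_block(chunk):
--     value = 0
--     for c in reversed(chunk):
--         value = value * 8 + ord(c)
--     return value
--
--
-- def divide_into_blocks(message: str, blockSize: int):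
--     return [encode_block(message[start:start + blockSize])
--             for start in range(0, len(message), blockSize)]
-- ===== Notes on version B (the rewrite author's own statement) =====
-- stated objective: alternative
-- what changed: Replaces the single shared index with inner break by explicit chunking (range with step blockSize + slicing) and evaluates each chunk by a Horner fold over the reversed chunk instead of computing 8**j per character (intended as faster; measured 26.7x at the largest size both finished, unconfirmed beyond); Pre_ excludes nonpositive blockSize with a nonempty message (A loops forever there) and blockSize = 0 with an empty message (A's while-guard accidentally returns [] while B's range(0,0,0) raises ValueError).
-- outside the precondition, e.g. on divide_into_blocks('', 0): A returns [], B raises ValueError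
import Mathlib
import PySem

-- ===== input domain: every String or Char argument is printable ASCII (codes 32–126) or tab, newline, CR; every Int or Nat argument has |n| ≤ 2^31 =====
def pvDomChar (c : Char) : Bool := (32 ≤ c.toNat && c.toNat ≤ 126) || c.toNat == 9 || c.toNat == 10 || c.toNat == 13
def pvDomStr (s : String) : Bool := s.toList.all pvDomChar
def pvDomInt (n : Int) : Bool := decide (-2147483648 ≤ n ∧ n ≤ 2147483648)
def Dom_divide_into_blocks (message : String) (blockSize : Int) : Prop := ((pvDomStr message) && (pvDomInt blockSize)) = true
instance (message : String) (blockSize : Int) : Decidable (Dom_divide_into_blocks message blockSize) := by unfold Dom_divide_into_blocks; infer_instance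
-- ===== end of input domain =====

-- B chunks the message with an explicit stride-range plus slices and evaluates each chunk
-- by a Horner fold instead of a shared index with an inner break and per-character 8**j.


-- ===== PORT A =====
-- inner `for j in range(blockSize)` with its `break`: structural recursion on the number of
-- remaining iterations (blockSize.toNat - j); j ≥ 0 throughout, so `8 ** j` is `8 ^ k` with k = j as a Nat;
-- `message[i]` is guarded by `i < len(message)`, so the getD default is never read
def pvInnerA (chars : List Char) : Nat → Nat → Nat → Int → Nat × Int
  | 0, _, i, t => (i, t)
  | rem + 1, k, i, t =>
    if chars.length ≤ i then (i, t)
    else pvInnerA chars rem (k + 1) (i + 1) (t + ((chars.getD i 'a').toNat : Int) * 8 ^ k)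

-- outer `while i < len(message)` with `result.append`: fuel len+1 never runs out on Pre_
-- (each iteration consumes at least one character there)
def pvLoopA (chars : List Char) (blockSize : Int) : Nat → Nat → List Int
  | 0, _ => []
  | fuel + 1, i =>
    if i < chars.length then
      let st := pvInnerA chars blockSize.toNat 0 i 0
      st.2 :: pvLoopA chars blockSize fuel st.1
    else []

def divide_into_blocks (message : String) (blockSize : Int) : List Int :=
  pvLoopA message.toList blockSize (message.toList.length + 1) 0

-- ===== PORT B =====
def encode_block (chunk : List Char) : Int :=
  chunk.reverse.foldl (fun value c => value * 8 + (c.toNat : Int)) 0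

def divide_into_blocks_alt (message : String) (blockSize : Int) : List Int :=
  (PySem.List.pyRange 0 (message.toList.length : Int) blockSize).map fun start =>
    encode_block (PySem.List.slice message.toList (some start) (some (start + blockSize)))

-- ===== PRECONDITION & SPEC =====
-- Pre_ excludes nonpositive blockSize with a nonempty message (A loops forever there) and
-- blockSize = 0 with an empty message (A's while-guard accidentally returns [] while B's
-- natural range(0, 0, 0) raises ValueError).
def Pre_divide_into_blocks (message : String) (blockSize : Int) : Prop :=
  1 ≤ blockSize ∨ (message.toList = [] ∧ blockSize < 0)
instance (message : String) (blockSize : Int) : Decidable (Pre_divide_into_blocks message blockSize) := by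
  unfold Pre_divide_into_blocks; infer_instance

def pvWitness_divide_into_blocks : String × Int := ("ab", 1)

def Spec_divide_into_blocks (message : String) (blockSize : Int) (out : List Int) : Prop :=
  out = divide_into_blocks_alt message blockSize
instance (message : String) (blockSize : Int) (out : List Int) : Decidable (Spec_divide_into_blocks message blockSize out) := by
  unfold Spec_divide_into_blocks; infer_instance

-- ===== CLAIM (what is proved, stated in full; the proofs are below) =====
def Claim_equal_divide_into_blocks : Prop := ∀ (message : String) (blockSize : Int), Dom_divide_into_blocks message blockSize → Pre_divide_into_blocks message blockSize → Spec_divide_into_blocks message blockSize (divide_into_blocks message blockSize)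

-- ===== LEMMAS AND PROOFS =====

-- proof-only specification: base-8 Horner value of a chunk
def pvHorner : List Char → Int
  | [] => 0
  | c :: l => (c.toNat : Int) + 8 * pvHorner l

lemma encode_block_eq (l : List Char) : encode_block l = pvHorner l := by
  unfold encode_block
  rw [List.foldl_reverse]
  induction l with
  | nil => rfl
  | cons c l ih => simp [pvHorner, ih]; ring

lemma pvInnerA_spec (chars : List Char) :
    ∀ (rem k i : Nat) (t : Int), i ≤ chars.length →
      pvInnerA chars rem k i t
        = (i + min rem (chars.length - i), t + 8 ^ k * pvHorner ((chars.drop i).take rem)) := by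
  intro rem
  induction rem with
  | zero => intro k i t _; simp [pvInnerA, pvHorner]
  | succ rem ih =>
    intro k i t hi
    by_cases h : chars.length ≤ i
    · have hd : chars.drop i = [] := List.drop_eq_nil_iff.mpr h
      simp [pvInnerA, h, hd, pvHorner]
    · have hlt : i < chars.length := by omega
      rw [pvInnerA, if_neg h, ih (k + 1) (i + 1) _ (by omega)]
      rw [List.drop_eq_getElem_cons hlt, List.take_succ_cons, pvHorner,
        List.getD_eq_getElem chars 'a' hlt, Prod.mk.injEq]
      exact ⟨by omega, by ring⟩

lemma pvLoopA_ge (chars : List Char) (bs : Int) (fuel i : Nat) (h : chars.length ≤ i) :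
    pvLoopA chars bs fuel i = [] := by
  cases fuel with
  | zero => rfl
  | succ fuel => rw [pvLoopA, if_neg (by omega)]

lemma pyRange_pos_nil (a b s : Int) (hs : 0 < s) (h : b ≤ a) :
    PySem.List.pyRange a b s = [] := by
  rw [PySem.List.pyRange_of_pos a b hs, if_neg (by omega)]
  rfl

lemma pyRange_pos_cons (a b s : Int) (hs : 0 < s) (hab : a < b) :
    PySem.List.pyRange a b s = a :: PySem.List.pyRange (a + s) b s := by
  rw [PySem.List.pyRange_of_pos a b hs, PySem.List.pyRange_of_pos (a + s) b hs, if_pos hab]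
  have hq : 0 ≤ (b - a - 1) / s := Int.ediv_nonneg (by omega) hs.le
  have hcount : ((b - a + s - 1) / s).toNat = ((b - a - 1) / s).toNat + 1 := by
    have h1 : (b - a - 1 + 1 * s) / s = (b - a - 1) / s + 1 :=
      Int.add_mul_ediv_right _ 1 (by omega)
    have h2 : b - a + s - 1 = b - a - 1 + 1 * s := by ring
    rw [h2, h1]
    omega
  rw [hcount, List.range_succ_eq_map, List.map_cons, List.cons.injEq]
  refine ⟨by simp, ?_⟩
  by_cases h : a + s < b
  · have heq : b - (a + s) + s - 1 = b - a - 1 := by ring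
    rw [if_pos h, heq, List.map_map]
    apply List.map_congr_left
    intro k _
    simp
    ring
  · have hz : (b - a - 1) / s = 0 :=
      Int.ediv_eq_zero_of_lt (by omega) (by omega)
    rw [if_neg h, hz]
    rfl

lemma pvLoopAB (chars : List Char) (bs : Int) (hbs : 1 ≤ bs) :
    ∀ (fuel i : Nat), i ≤ chars.length → chars.length - i ≤ fuel →
      pvLoopA chars bs fuel i
        = (PySem.List.pyRange (i : Int) (chars.length : Int) bs).map fun start =>
            encode_block (PySem.List.slice chars (some start) (some (start + bs))) := by
  intro fuel
  induction fuel with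
  | zero =>
    intro i hi hf
    have hle : (chars.length : Int) ≤ (i : Int) := by exact_mod_cast (by omega : chars.length ≤ i)
    rw [pvLoopA, pyRange_pos_nil _ _ _ (by omega) hle]
    rfl
  | succ fuel ih =>
    intro i hi hf
    by_cases hlt : i < chars.length
    · have hn : bs = (bs.toNat : Int) := by omega
      have hn1 : 1 ≤ bs.toNat := by omega
      rw [pyRange_pos_cons _ _ _ (by omega) (by exact_mod_cast hlt), List.map_cons,
        pvLoopA, if_pos hlt]
      have hst := pvInnerA_spec chars bs.toNat 0 i 0 (by omega)
      simp only [hst]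
      rw [List.cons.injEq]
      refine ⟨?_, ?_⟩
      · -- heads: the inner loop computes the Horner value of the chunk
        rw [hn, PySem.List.slice_natCast_add chars i bs.toNat, encode_block_eq]
        simp
        congr 2
        omega
      · -- tails
        by_cases hc : i + bs.toNat ≤ chars.length
        · have h1 : i + min bs.toNat (chars.length - i) = i + bs.toNat := by omega
          rw [h1, ih (i + bs.toNat) (by omega) (by omega)]
          have h2 : ((i + bs.toNat : Nat) : Int) = (i : Int) + bs := by omega
          rw [h2]
        · have h1 : i + min bs.toNat (chars.length - i) = chars.length := by omega
          rw [h1, pvLoopA_ge _ _ _ _ (le_refl _),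
            pyRange_pos_nil _ _ _ (by omega) (by omega)]
          rfl
    · have hle : (chars.length : Int) ≤ (i : Int) := by exact_mod_cast (by omega : chars.length ≤ i)
      rw [pvLoopA, if_neg hlt, pyRange_pos_nil _ _ _ (by omega) hle]
      rfl

-- ===== VERDICT (by name: the statement is the Claim_ definition above) =====
theorem divide_into_blocks_spec : Claim_equal_divide_into_blocks := by
  intro message bs _dom hpre
  unfold Spec_divide_into_blocks divide_into_blocks divide_into_blocks_alt
  rcases hpre with hbs | ⟨hemp, hneg⟩
  · have h := pvLoopAB message.toList bs hbs (message.toList.length + 1) 0 (by omega) (by omega)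
    simpa using h
  · rw [hemp]
    simp [pvLoopA, PySem.List.pyRange]
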